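-- pv_equiv track=rewrite | github.com/philornot/InformatykaTrzeciaKlasa | matura2017czerwiec/Zadanie4/Filip/4.2.py | czy_cyfro_podobne
-- ===== SOURCE A (Python) =====
-- def czy_cyfro_podobne(jakas_liczba1, jakas_liczba2):
--     cyfry1 = []
--     for cyfra1 in str(jakas_liczba1):
--         if cyfra1 not in cyfry1:
--             cyfry1.append(cyfra1)
--
--     for cyfra2 in str(jakas_liczba2):
--         if cyfra2 not in cyfry1:
--             return False
--
--     return True
-- ===== SOURCE B (Python) =====
-- def czy_cyfro_podobne(jakas_liczba1, jakas_liczba2):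
--     # Arithmetic re-implementation: no strings at all.  Each number's decimal
--     # digits are collected into a 10-bit bitmask by repeated divmod-by-10;
--     # the answer is a bitmask-subset test plus a sign check (a '-' in str(n2)
--     # can only be matched by a '-' in str(n1), i.e. n1 < 0).
--     def mask(n):
--         m = 0
--         n = abs(n)
--         while True:
--             m |= 1 << (n % 10)
--             n //= 10
--             if n == 0:
--                 break
--         return m
--
--     sign_ok = (jakas_liczba2 >= 0) or (jakas_liczba1 < 0)
--     mb = mask(jakas_liczba2)
--     ma = mask(jakas_liczba1)
--     return sign_ok and (mb & ma == mb)
-- ===== Notes on version B (the rewrite author's own statement) =====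
-- stated objective: alternative
-- what changed: Replaces A's string-and-dedup-list scan by pure integer arithmetic: each number's digits are folded into a 10-bit bitmask via repeated divmod-by-10, and the result is a bitwise subset test plus an explicit sign comparison, so no str(), no list, no membership loop remains.
import Mathlib
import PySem

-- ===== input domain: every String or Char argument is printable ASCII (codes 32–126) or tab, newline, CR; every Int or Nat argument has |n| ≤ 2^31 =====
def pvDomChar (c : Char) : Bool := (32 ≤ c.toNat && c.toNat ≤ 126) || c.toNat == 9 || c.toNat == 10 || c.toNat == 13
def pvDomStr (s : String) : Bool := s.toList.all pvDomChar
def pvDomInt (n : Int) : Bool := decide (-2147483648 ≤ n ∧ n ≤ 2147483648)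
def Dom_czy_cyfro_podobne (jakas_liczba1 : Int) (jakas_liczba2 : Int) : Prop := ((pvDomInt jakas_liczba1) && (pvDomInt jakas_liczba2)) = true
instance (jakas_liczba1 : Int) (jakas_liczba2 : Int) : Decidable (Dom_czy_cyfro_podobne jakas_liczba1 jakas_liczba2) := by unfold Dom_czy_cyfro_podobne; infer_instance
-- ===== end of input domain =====

-- B replaces A's string/dedup-list scan by integer arithmetic: a 10-bit digit bitmask built by
-- repeated divmod-by-10, a bitwise subset test and an explicit sign check (alternative algorithm).

-- ===== PORT A =====
-- the second for-loop of A with its early 'return False'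
def czyLoop (cyfry1 : List Char) : List Char → Bool
  | [] => true
  | c :: rest => if cyfry1.contains c then czyLoop cyfry1 rest else false

def czy_cyfro_podobne (jakas_liczba1 : Int) (jakas_liczba2 : Int) : Bool :=
  let cyfry1 := (PySem.Int.toChars jakas_liczba1).foldl
    (fun acc c => if acc.contains c then acc else acc ++ [c]) ([] : List Char)
  czyLoop cyfry1 (PySem.Int.toChars jakas_liczba2)

-- ===== PORT B =====
-- Source B's inner `mask`: do-while over n = abs input, collecting 1 << (n % 10); stops when n // 10 = 0
-- (structural recursion on a fuel counter, n+1 fuel always suffices, as in Nat.toDigitsCore)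
def digitMaskGo : Nat → Nat → Nat
  | 0, n => 1 <<< (n % 10)
  | f + 1, n => if n / 10 = 0 then 1 <<< (n % 10) else (1 <<< (n % 10)) ||| digitMaskGo f (n / 10)

def digitMask (n : Nat) : Nat := digitMaskGo (n + 1) n

def czy_cyfro_podobne_alt (jakas_liczba1 : Int) (jakas_liczba2 : Int) : Bool :=
  let sign_ok := decide (0 ≤ jakas_liczba2) || decide (jakas_liczba1 < 0)
  let mb := digitMask jakas_liczba2.natAbs
  let ma := digitMask jakas_liczba1.natAbs
  sign_ok && (mb &&& ma == mb)

-- ===== PRECONDITION & SPEC =====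
def Spec_czy_cyfro_podobne (jakas_liczba1 : Int) (jakas_liczba2 : Int) (out : Bool) : Prop := out = czy_cyfro_podobne_alt jakas_liczba1 jakas_liczba2
instance (jakas_liczba1 : Int) (jakas_liczba2 : Int) (out : Bool) : Decidable (Spec_czy_cyfro_podobne jakas_liczba1 jakas_liczba2 out) := by unfold Spec_czy_cyfro_podobne; infer_instance

-- ===== CLAIM (what is proved, stated in full; the proofs are below) =====
def Claim_equal_czy_cyfro_podobne : Prop := ∀ (jakas_liczba1 : Int) (jakas_liczba2 : Int), Dom_czy_cyfro_podobne jakas_liczba1 jakas_liczba2 → Spec_czy_cyfro_podobne jakas_liczba1 jakas_liczba2 (czy_cyfro_podobne jakas_liczba1 jakas_liczba2)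

-- ===== LEMMAS AND PROOFS =====

-- A's dedup-building fold is exactly PySem.Set.ofList
theorem foldl_dedup_eq_ofList (l : List Char) :
    l.foldl (fun acc c => if acc.contains c then acc else acc ++ [c]) ([] : List Char)
      = PySem.Set.ofList l := by
  rw [PySem.Set.ofList_eq_foldl]
  rfl

-- A's early-return loop checks membership of every character
theorem czyLoop_eq_all (s : List Char) (l : List Char) :
    czyLoop s l = l.all (fun c => s.contains c) := by
  induction l with
  | nil => rfl
  | cons c rest ih =>
    simp only [czyLoop, List.all_cons]
    by_cases h : s.contains c = true <;> simp [ih]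

-- digitChar is injective on single digits
theorem digitChar_inj (d e : Nat) (hd : d < 10) (he : e < 10)
    (h : Nat.digitChar d = Nat.digitChar e) : d = e := by
  interval_cases d <;> interval_cases e <;> simp_all [Nat.digitChar]

-- a digit character is never the minus sign
theorem digitChar_ne_dash (d : Nat) (hd : d < 10) : Nat.digitChar d ≠ '-' := by
  interval_cases d <;> decide

-- the fuel parameter of digitMaskGo is irrelevant once it is large enough
theorem digitMaskGo_irrel : ∀ (f g n : Nat), n < f → n < g → digitMaskGo f n = digitMaskGo g n := by
  intro f
  induction f with
  | zero => omega
  | succ f ih =>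
    intro g n hf hg
    obtain ⟨g', rfl⟩ : ∃ g', g = g' + 1 := ⟨g - 1, by omega⟩
    rw [digitMaskGo, digitMaskGo]
    by_cases h0 : n / 10 = 0
    · rw [if_pos h0, if_pos h0]
    · rw [if_neg h0, if_neg h0]
      rw [ih f (n / 10) (by omega) (by omega), ih g' (n / 10) (by omega) (by omega)]

-- the one-step unfolding of digitMask (the do-while loop body)
theorem digitMask_eq (n : Nat) :
    digitMask n = if n / 10 = 0 then 1 <<< (n % 10)
      else (1 <<< (n % 10)) ||| digitMask (n / 10) := by
  by_cases h0 : n / 10 = 0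
  · rw [if_pos h0]
    unfold digitMask
    rw [digitMaskGo, if_pos h0]
  · rw [if_neg h0]
    unfold digitMask
    rw [digitMaskGo, if_neg h0,
      digitMaskGo_irrel n (n / 10 + 1) (n / 10) (by omega) (by omega)]

-- only bits 0..9 ever appear in a digit mask
theorem digitMaskGo_testBit_lt (f : Nat) : ∀ (n d : Nat), (digitMaskGo f n).testBit d = true → d < 10 := by
  induction f with
  | zero =>
    intro n d h
    rw [digitMaskGo, Nat.shiftLeft_eq, one_mul, Nat.testBit_two_pow, decide_eq_true_eq] at h
    omega
  | succ f ih =>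
    intro n d h
    rw [digitMaskGo] at h
    by_cases h0 : n / 10 = 0
    · rw [if_pos h0, Nat.shiftLeft_eq, one_mul, Nat.testBit_two_pow, decide_eq_true_eq] at h
      omega
    · rw [if_neg h0, Nat.testBit_or, Bool.or_eq_true] at h
      rcases h with h | h
      · rw [Nat.shiftLeft_eq, one_mul, Nat.testBit_two_pow, decide_eq_true_eq] at h
        omega
      · exact ih (n / 10) d h

theorem digitMask_testBit_lt (n d : Nat) (h : (digitMask n).testBit d = true) : d < 10 :=
  digitMaskGo_testBit_lt (n + 1) n d h

-- the characters produced by Nat.toDigitsCore are exactly the digits recorded in digitMask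
theorem mem_toDigitsCore (f : Nat) : ∀ (n : Nat) (l : List Char) (c : Char), n < f →
    (c ∈ Nat.toDigitsCore 10 f n l ↔
      (∃ d, d < 10 ∧ (digitMask n).testBit d = true ∧ c = Nat.digitChar d) ∨ c ∈ l) := by
  induction f with
  | zero => intro n l c hn; omega
  | succ f ih =>
    intro n l c hn
    rw [Nat.toDigitsCore]
    by_cases h0 : n / 10 = 0
    · rw [digitMask_eq, if_pos h0]
      simp only [h0, if_true, List.mem_cons]
      constructor
      · rintro (rfl | hc)
        · exact Or.inl ⟨n % 10, Nat.mod_lt n (by omega),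
            by rw [Nat.shiftLeft_eq, one_mul, Nat.testBit_two_pow]; simp, rfl⟩
        · exact Or.inr hc
      · rintro (⟨d, hd, hbit, rfl⟩ | hc)
        · rw [Nat.shiftLeft_eq, one_mul, Nat.testBit_two_pow, decide_eq_true_eq] at hbit
          exact Or.inl (by rw [hbit])
        · exact Or.inr hc
    · rw [digitMask_eq, if_neg h0]
      simp only [h0, if_false]
      have hn10 : n / 10 < f := by
        have h10 : 10 ≤ n := by
          by_contra hlt
          exact h0 (Nat.div_eq_of_lt (by omega))
        have := Nat.div_lt_self (by omega : 0 < n) (by omega : 1 < 10)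
        omega
      rw [ih (n / 10) (Nat.digitChar (n % 10) :: l) c hn10]
      simp only [List.mem_cons, Nat.testBit_or, Bool.or_eq_true]
      constructor
      · rintro (⟨d, hd, hbit, rfl⟩ | rfl | hc)
        · exact Or.inl ⟨d, hd, Or.inr hbit, rfl⟩
        · exact Or.inl ⟨n % 10, Nat.mod_lt n (by omega), Or.inl
            (by rw [Nat.shiftLeft_eq, one_mul, Nat.testBit_two_pow]; simp), rfl⟩
        · exact Or.inr hc
      · rintro (⟨d, hd, hbit | hbit, rfl⟩ | hc)
        · rw [Nat.shiftLeft_eq, one_mul, Nat.testBit_two_pow, decide_eq_true_eq] at hbit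
          exact Or.inr (Or.inl (by rw [hbit]))
        · exact Or.inl ⟨d, hd, hbit, rfl⟩
        · exact Or.inr (Or.inr hc)

-- membership in str(n)'s digit part, characterised by the bitmask
theorem mem_toDigits (n : Nat) (c : Char) :
    c ∈ Nat.toDigits 10 n ↔ ∃ d, d < 10 ∧ (digitMask n).testBit d = true ∧ c = Nat.digitChar d := by
  rw [Nat.toDigits, mem_toDigitsCore (n + 1) n [] c (by omega)]
  simp

-- bitwise subset test
theorem and_eq_left_iff (a b : Nat) :
    (b &&& a = b) ↔ ∀ d, b.testBit d = true → a.testBit d = true := by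
  constructor
  · intro h d hb
    have := congrArg (fun x => Nat.testBit x d) h
    simp only [Nat.testBit_and, hb, Bool.true_and] at this
    exact this
  · intro h
    apply Nat.eq_of_testBit_eq
    intro d
    rw [Nat.testBit_and]
    by_cases hb : b.testBit d = true
    · simp [hb, h d hb]
    · simp [Bool.eq_false_iff.mpr hb]

-- the minus sign is not a digit character
theorem dash_not_mem_toDigits (n : Nat) : '-' ∉ Nat.toDigits 10 n := by
  intro h
  obtain ⟨d, hd, _, hc⟩ := (mem_toDigits n '-').mp h
  exact digitChar_ne_dash d hd hc.symm

-- digit-character containment is exactly bitmask containment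
theorem digits_subset_iff (na nb : Nat) :
    (∀ c ∈ Nat.toDigits 10 nb, c ∈ Nat.toDigits 10 na) ↔
    (∀ d, (digitMask nb).testBit d = true → (digitMask na).testBit d = true) := by
  constructor
  · intro h d hd
    have hd10 : d < 10 := digitMask_testBit_lt nb d hd
    have hmem : Nat.digitChar d ∈ Nat.toDigits 10 nb := (mem_toDigits nb _).mpr ⟨d, hd10, hd, rfl⟩
    obtain ⟨e, he, hbit, hc⟩ := (mem_toDigits na _).mp (h _ hmem)
    rwa [digitChar_inj d e hd10 he hc]
  · intro h c hc
    obtain ⟨d, hd, hbit, rfl⟩ := (mem_toDigits nb c).mp hc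
    exact (mem_toDigits na _).mpr ⟨d, hd, h d hbit, rfl⟩

-- all characters of str(n2) occur in str(n1)  ↔  bitmask subset ∧ sign condition
theorem main_eq (a b : Int) :
    ((PySem.Int.toChars b).all (fun c => (PySem.Int.toChars a).contains c))
      = ((decide (0 ≤ b) || decide (a < 0))
          && (digitMask b.natAbs &&& digitMask a.natAbs == digitMask b.natAbs)) := by
  have hta : ¬ a < 0 → a.toNat = a.natAbs := fun h => by omega
  have htb : ¬ b < 0 → b.toNat = b.natAbs := fun h => by omega
  rw [Bool.eq_iff_iff]
  simp only [PySem.Int.toChars, List.all_eq_true, List.contains_iff_mem,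
    Bool.and_eq_true, Bool.or_eq_true, decide_eq_true_eq, beq_iff_eq]
  by_cases ha : a < 0 <;> by_cases hb : b < 0
  · -- a < 0, b < 0
    simp only [if_pos ha, if_pos hb, List.mem_cons]
    constructor
    · intro h
      refine ⟨Or.inr ha, (and_eq_left_iff _ _).mpr ?_⟩
      rw [← digits_subset_iff]
      intro c hc
      rcases h c (Or.inr hc) with h' | h'
      · exact absurd (h' ▸ hc) (dash_not_mem_toDigits _)
      · exact h'
    · rintro ⟨-, hsub⟩ c hc
      rcases hc with rfl | hc
      · exact Or.inl rfl
      · exact Or.inr ((digits_subset_iff _ _).mpr ((and_eq_left_iff _ _).mp hsub) c hc)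
  · -- a < 0, b ≥ 0
    simp only [if_pos ha, if_neg hb, htb hb, List.mem_cons]
    constructor
    · intro h
      refine ⟨Or.inr ha, (and_eq_left_iff _ _).mpr ?_⟩
      rw [← digits_subset_iff]
      intro c hc
      rcases h c hc with h' | h'
      · exact absurd (h' ▸ hc) (dash_not_mem_toDigits _)
      · exact h'
    · rintro ⟨-, hsub⟩ c hc
      exact Or.inr ((digits_subset_iff _ _).mpr ((and_eq_left_iff _ _).mp hsub) c hc)
  · -- a ≥ 0, b < 0: '-' has nowhere to go, both sides false
    simp only [if_neg ha, if_pos hb, hta ha, List.mem_cons]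
    constructor
    · intro h
      exact absurd (h '-' (Or.inl rfl)) (dash_not_mem_toDigits _)
    · rintro ⟨h | h, -⟩
      · omega
      · omega
  · -- a ≥ 0, b ≥ 0
    simp only [if_neg ha, if_neg hb, hta ha, htb hb]
    constructor
    · intro h
      exact ⟨Or.inl (by omega), (and_eq_left_iff _ _).mpr ((digits_subset_iff _ _).mp h)⟩
    · rintro ⟨-, hsub⟩
      exact (digits_subset_iff _ _).mpr ((and_eq_left_iff _ _).mp hsub)

theorem czy_cyfro_podobne_spec : Claim_equal_czy_cyfro_podobne := by
  intro a b _
  unfold Spec_czy_cyfro_podobne czy_cyfro_podobne czy_cyfro_podobne_alt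
  rw [foldl_dedup_eq_ofList, czyLoop_eq_all]
  have hone : ∀ c : Char, List.contains (PySem.Set.ofList (PySem.Int.toChars a)) c
      = List.contains (PySem.Int.toChars a) c := by
    intro c
    rw [Bool.eq_iff_iff]
    simp [PySem.Set.mem_ofList]
  exact (congrArg (fun f => (PySem.Int.toChars b).all f) (funext hone)).trans (main_eq a b)
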